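-- pv_equiv track=rewrite | github.com/cgunnars/egfr-seq_repo | src/growth/loadData.py | set_cond
-- ===== SOURCE A (Python) =====
-- def set_cond(row, condnames, ctrls=['uninf','dmso','media']):
--     colnames = row['condition_name'].split(' ')
--     colvals = row['condition'].split(' ')
--
--     for colname, colval in zip(colnames, colvals):
--        if colname in condnames:
--             row[colname] = colval
--
--     #remove donor from condition to avoid issues later
--     row['condition'] = ' '.join([x for x, y in zip(colvals, colnames) if y != 'donor'])
--     return row
-- ===== SOURCE B (Python) =====
-- def set_cond(row, condnames, ctrls=['uninf','dmso','media']):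
--     # recursive decomposition: one structural recursion over the token pairs that
--     # performs the field assignments on the way down and builds the non-donor
--     # condition parts on the way back up (cons after the recursive call)
--     def go(pairs):
--         if not pairs:
--             return []
--         name, val = pairs[0]
--         if name in condnames:
--             row[name] = val
--         rest = go(pairs[1:])
--         return [val] + rest if name != 'donor' else rest
--     parts = go(list(zip(row['condition_name'].split(' '), row['condition'].split(' '))))
--     row['condition'] = ' '.join(parts)
--     return row
-- ===== Notes on version B (the rewrite author's own statement) =====
-- stated objective: alternative
-- what changed: A's two staged iterative passes (an assignment loop over the zip, then a filtering comprehension joined into the condition field) are replaced by a single structural recursion over the token pairs that assigns fields on the way down and constructs the non-donor parts list on the way back up by consing after the recursive call.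
import Mathlib
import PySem

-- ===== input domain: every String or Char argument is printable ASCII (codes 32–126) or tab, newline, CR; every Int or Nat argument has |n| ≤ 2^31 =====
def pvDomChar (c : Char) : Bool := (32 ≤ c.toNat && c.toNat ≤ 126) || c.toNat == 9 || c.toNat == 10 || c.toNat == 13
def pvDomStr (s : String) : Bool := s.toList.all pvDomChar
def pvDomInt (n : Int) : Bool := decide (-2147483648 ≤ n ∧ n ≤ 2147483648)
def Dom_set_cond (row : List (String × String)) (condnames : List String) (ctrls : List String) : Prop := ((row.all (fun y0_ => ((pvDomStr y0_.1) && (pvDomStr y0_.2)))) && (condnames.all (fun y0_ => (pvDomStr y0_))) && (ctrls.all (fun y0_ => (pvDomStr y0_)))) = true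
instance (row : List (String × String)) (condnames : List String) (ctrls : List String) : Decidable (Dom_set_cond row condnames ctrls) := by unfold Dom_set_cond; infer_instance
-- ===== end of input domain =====

-- B replaces A's two staged passes by one structural recursion over the token pairs (assign on the
-- way down, cons the non-donor parts on the way up); equivalence is about the returned dict (both
-- Pythons also mutate row, and they mutate it identically).


-- ===== PORT A =====
def set_cond (row : List (String × String)) (condnames : List String) (ctrls : List String) : List (String × String) :=
  let d := PySem.Dict.ofList row
  match d.get? "condition_name", d.get? "condition" with
  | some cn, some c =>
    let colnames := (PySem.Str.split? cn " ").getD []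
    let colvals := (PySem.Str.split? c " ").getD []
    -- first pass: for colname, colval in zip(colnames, colvals): if colname in condnames: row[colname] = colval
    let d := (colnames.zip colvals).foldl
      (fun (d : PySem.Dict String String) p => if p.1 ∈ condnames then d.insert p.1 p.2 else d) d
    -- second pass: row['condition'] = ' '.join([x for x, y in zip(colvals, colnames) if y != 'donor'])
    let d := d.insert "condition"
      (PySem.Str.join " " (((colvals.zip colnames).filter (fun p => p.2 ≠ "donor")).map (·.1)))
    d.items
  | _, _ => []  -- unreachable under Pre_set_cond (Python raises KeyError)

-- ===== PORT B =====
-- B's inner 'go': the mutated row becomes a threaded dict; assignments happen before the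
-- recursive call, the non-donor value is consed onto the recursion's result.
def setCondGo (condnames : List String) (pairs : List (String × String))
    (d : PySem.Dict String String) : PySem.Dict String String × List String :=
  match pairs with
  | [] => (d, [])
  | (name, val) :: rest =>
    let d1 := if name ∈ condnames then d.insert name val else d
    let r := setCondGo condnames rest d1
    (r.1, if name ≠ "donor" then val :: r.2 else r.2)

def set_cond_alt (row : List (String × String)) (condnames : List String) (ctrls : List String) : List (String × String) :=
  let d := PySem.Dict.ofList row
  match d.get? "condition_name" with
  | none => []  -- unreachable under Pre_set_cond
  | some cn =>
    match d.get? "condition" with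
    | none => []  -- unreachable under Pre_set_cond
    | some c =>
      let r := setCondGo condnames
        (((PySem.Str.split? cn " ").getD []).zip ((PySem.Str.split? c " ").getD [])) d
      (r.1.insert "condition" (PySem.Str.join " " r.2)).items

-- ===== PRECONDITION & SPEC =====
-- Pre_ excludes exactly the rows missing the 'condition_name' or 'condition' key, on which Python A raises KeyError.
def Pre_set_cond (row : List (String × String)) (condnames : List String) (ctrls : List String) : Prop :=
  "condition_name" ∈ row.map Prod.fst ∧ "condition" ∈ row.map Prod.fst
instance (row : List (String × String)) (condnames : List String) (ctrls : List String) : Decidable (Pre_set_cond row condnames ctrls) := by unfold Pre_set_cond; infer_instance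
def pvWitness_set_cond : (List (String × String)) × List String × List String :=
  ([("condition_name", "donor dose"), ("condition", "d1 10uM")], ["dose"], ["uninf", "dmso", "media"])

def Spec_set_cond (row : List (String × String)) (condnames : List String) (ctrls : List String) (out : List (String × String)) : Prop := out = set_cond_alt row condnames ctrls
instance (row : List (String × String)) (condnames : List String) (ctrls : List String) (out : List (String × String)) : Decidable (Spec_set_cond row condnames ctrls out) := by unfold Spec_set_cond; infer_instance

-- ===== CLAIM (what is proved, stated in full; the proofs are below) =====
def Claim_equal_set_cond : Prop := ∀ (row : List (String × String)) (condnames : List String) (ctrls : List String), Dom_set_cond row condnames ctrls → Pre_set_cond row condnames ctrls → Spec_set_cond row condnames ctrls (set_cond row condnames ctrls)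

-- ===== LEMMAS AND PROOFS =====

-- B's recursion computes A's assignment fold together with the filtered value list.
theorem setCondGo_eq (condnames : List String) (l : List (String × String))
    (d : PySem.Dict String String) :
    setCondGo condnames l d
    = (l.foldl (fun (d : PySem.Dict String String) p =>
          if p.1 ∈ condnames then d.insert p.1 p.2 else d) d,
       (l.filter (fun p => p.1 ≠ "donor")).map (·.2)) := by
  induction l generalizing d with
  | nil => simp [setCondGo]
  | cons p t ih =>
    obtain ⟨name, val⟩ := p
    by_cases hd : name = "donor" <;> simp [setCondGo, ih, hd]

-- A's comprehension over zip(colvals, colnames) equals B's selection over zip(colnames, colvals).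
theorem zip_filter_swap (a b : List String) :
    ((b.zip a).filter (fun p => p.2 ≠ "donor")).map (·.1)
    = ((a.zip b).filter (fun p => p.1 ≠ "donor")).map (·.2) := by
  induction a generalizing b with
  | nil => simp
  | cons x t ih =>
    cases b with
    | nil => simp
    | cons y u =>
      by_cases hd : x = "donor" <;> simp [hd] <;> simpa using ih u

-- ===== VERDICT (by name: the statement is the Claim_ definition above) =====
theorem set_cond_spec : Claim_equal_set_cond := by
  intro row condnames ctrls _ _
  show set_cond row condnames ctrls = set_cond_alt row condnames ctrls
  rcases hcn : (PySem.Dict.ofList row).get? "condition_name" with _ | cn <;>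
    rcases hc : (PySem.Dict.ofList row).get? "condition" with _ | c <;>
      simp only [set_cond, set_cond_alt, hcn, hc, setCondGo_eq, zip_filter_swap]
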